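-- pv_equiv track=rewrite | github.com/soufDev/PythonTuto | PenduJeu/fonctions.py | search
-- ===== SOURCE A (Python) =====
-- def search(word, letter):
--     if letter in list(word):
--         word_liste = list(word)
--         for i in range(len(word_liste)):
--             if letter != word_liste[i]:
--                 word_liste[i] = "*"
--         word = "".join(word_liste)
--
--     return word
-- ===== SOURCE B (Python) =====
-- def search(word, letter):
--     if letter in list(word):
--         word = letter.join('*' * len(p) for p in word.split(letter))
--     return word
-- ===== Notes on version B (the rewrite author's own statement) =====
-- stated objective: idiomatic
-- what changed: Replaces A's index loop that overwrites each non-matching position in a char list with a split/join: split the word on the preserved letter, mask each piece wholesale with '*'*len(piece), and rejoin with the letter.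
import Mathlib
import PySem

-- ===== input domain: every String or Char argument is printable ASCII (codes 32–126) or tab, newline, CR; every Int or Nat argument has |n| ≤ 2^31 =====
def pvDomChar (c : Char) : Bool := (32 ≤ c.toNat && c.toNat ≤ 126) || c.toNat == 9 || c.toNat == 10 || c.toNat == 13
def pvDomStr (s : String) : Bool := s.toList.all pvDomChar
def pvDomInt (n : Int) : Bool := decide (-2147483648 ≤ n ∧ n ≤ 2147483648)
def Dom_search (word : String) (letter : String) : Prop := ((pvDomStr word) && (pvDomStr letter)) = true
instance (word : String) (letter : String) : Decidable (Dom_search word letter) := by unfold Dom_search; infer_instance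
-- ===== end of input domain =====

-- B masks whole runs between occurrences with split/join instead of A's per-index loop (idiomatic rewrite, same cost).

-- ===== PORT A =====
-- `letter in list(word)`: membership of `letter` in the list of 1-char strings of `word`
def search (word : String) (letter : String) : String :=
  let wl := word.toList.map (fun ch => String.ofList [ch])
  if letter ∈ wl then
    -- for i in range(len(word_liste)): if letter != word_liste[i]: word_liste[i] = "*"
    let wl2 := (List.range wl.length).foldl
      (fun acc i => if letter ≠ acc.getD i "" then acc.set i "*" else acc) wl
    PySem.Str.join "" wl2
  else word

-- ===== PORT B =====
-- word.split(letter) ported via PySem.Chars.splitOn on code points (the guard guarantees letter ≠ "");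
-- '*' * len(p) is List.replicate
def search_alt (word : String) (letter : String) : String :=
  if letter ∈ word.toList.map (fun ch => String.ofList [ch]) then
    PySem.Str.join letter
      ((PySem.Chars.splitOn word.toList letter.toList).map
        (fun p => String.ofList (List.replicate p.length '*')))
  else word

-- ===== PRECONDITION & SPEC =====
def Spec_search (word : String) (letter : String) (out : String) : Prop := out = search_alt word letter
instance (word : String) (letter : String) (out : String) : Decidable (Spec_search word letter out) := by unfold Spec_search; infer_instance

-- ===== CLAIM (what is proved, stated in full; the proofs are below) =====
def Claim_equal_search : Prop := ∀ (word : String) (letter : String), Dom_search word letter → Spec_search word letter (search word letter)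

-- ===== LEMMAS AND PROOFS =====

-- proof-side model of CPython str.split for a single-char separator
def pySplitC (c : Char) : List Char → List Char → List (List Char)
  | [], cur => [cur.reverse]
  | ch :: rest, cur =>
    if ch = c then cur.reverse :: pySplitC c rest [] else pySplitC c rest (ch :: cur)

theorem pySplitC_ne_nil (c : Char) (l cur : List Char) : pySplitC c l cur ≠ [] := by
  induction l generalizing cur with
  | nil => simp [pySplitC]
  | cons ch rest ih => by_cases h : ch = c <;> simp [pySplitC, h, ih]

theorem splitOn_go_eq (c : Char) (fuel : Nat) :
    ∀ (l cur : List Char) (acc : List (List Char)), l.length ≤ fuel →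
      PySem.Chars.splitOn.go [c] fuel l cur acc = acc.reverse ++ pySplitC c l cur := by
  induction fuel with
  | zero =>
    intro l cur acc h
    have hl : l = [] := by cases l <;> simp_all
    subst hl
    simp [PySem.Chars.splitOn.go, pySplitC]
  | succ fuel ih =>
    intro l cur acc h
    cases l with
    | nil => simp [PySem.Chars.splitOn.go, pySplitC]
    | cons ch rest =>
      by_cases hc : c = ch
      · subst hc
        have : [c].isPrefixOf (c :: rest) = true := by simp [List.isPrefixOf]
        simp only [PySem.Chars.splitOn.go, this, if_pos, List.length_cons,
          List.length_nil, Nat.zero_add, List.drop_succ_cons, List.drop_zero]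
        rw [ih rest [] (cur.reverse :: acc) (by simpa using h)]
        simp [pySplitC]
      · have hpre : [c].isPrefixOf (ch :: rest) = false := by
          simp [List.isPrefixOf]; exact hc
        simp only [PySem.Chars.splitOn.go, hpre, Bool.false_eq_true, if_false]
        rw [ih rest (ch :: cur) acc (by simpa using h)]
        have hne : ¬ ch = c := fun hh => hc hh.symm
        simp [pySplitC, hne]

theorem splitOn_eq_pySplitC (c : Char) (cs : List Char) :
    PySem.Chars.splitOn cs [c] = pySplitC c cs [] := by
  unfold PySem.Chars.splitOn
  rw [splitOn_go_eq c (cs.length + 1) cs [] [] (by omega)]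
  simp

theorem join_mask (c : Char) (l : List Char) :
    ∀ cur : List Char,
      PySem.Chars.join [c] ((pySplitC c l cur).map (fun p => List.replicate p.length '*'))
        = List.replicate cur.length '*' ++ l.map (fun ch => if ch = c then ch else '*') := by
  induction l with
  | nil => intro cur; simp [pySplitC, PySem.Chars.join_singleton]
  | cons ch rest ih =>
    intro cur
    by_cases h : ch = c
    · subst h
      obtain ⟨a, t, ht⟩ : ∃ a t, pySplitC ch rest [] = a :: t := by
        cases hr : pySplitC ch rest [] with
        | nil => exact absurd hr (pySplitC_ne_nil ch rest [])
        | cons a t => exact ⟨a, t, rfl⟩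
      simp only [pySplitC, ht, List.map_cons, if_true]
      rw [PySem.Chars.join_cons_cons]
      have := ih []
      rw [ht] at this
      simp only [List.map_cons, List.length_nil, List.replicate_zero, List.nil_append] at this
      rw [this]
      simp
    · simp only [pySplitC, if_neg h, ih (ch :: cur)]
      simp [List.replicate_succ' , h, List.append_assoc]

-- A's index loop over a list of strings is the pointwise mask
theorem foldl_set_mask (letter : String) :
    ∀ (suf pre : List String),
      (List.range' pre.length suf.length).foldl
        (fun acc i => if letter ≠ acc.getD i "" then acc.set i "*" else acc) (pre ++ suf)
      = pre ++ suf.map (fun s => if letter ≠ s then "*" else s) := by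
  intro suf
  induction suf with
  | nil => intro pre; simp
  | cons s rest ih =>
    intro pre
    rw [List.length_cons, List.range'_succ, List.foldl_cons]
    have hget : (pre ++ s :: rest).getD pre.length "" = s := by
      simp [List.getD]
    have hset : (pre ++ s :: rest).set pre.length "*" = pre ++ "*" :: rest := by
      rw [List.set_append]
      simp
    rw [hget]
    by_cases hls : letter ≠ s
    · rw [if_pos hls, hset]
      have := ih (pre ++ ["*"])
      simp only [List.length_append, List.length_cons, List.length_nil, Nat.zero_add,
        List.append_assoc, List.singleton_append] at this ⊢
      rw [this]
      simp [hls]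
    · rw [if_neg hls]
      have := ih (pre ++ [s])
      simp only [List.length_append, List.length_cons, List.length_nil, Nat.zero_add,
        List.append_assoc, List.singleton_append] at this ⊢
      rw [this]
      simp [hls]

-- ===== VERDICT (by name: the statement is the Claim_ definition above) =====
theorem search_spec : Claim_equal_search := by
  intro word letter _
  unfold Spec_search search search_alt
  by_cases hmem : letter ∈ word.toList.map (fun ch => String.ofList [ch])
  · simp only [hmem, if_pos]
    obtain ⟨c, hc, hlet⟩ := List.mem_map.mp hmem
    apply String.toList_inj.mp
    -- A side
    have hA := foldl_set_mask letter (word.toList.map (fun ch => String.ofList [ch])) []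
    simp only [List.nil_append, List.length_nil] at hA
    rw [← List.range_eq_range'] at hA
    rw [hA, PySem.Str.toList_join]
    -- B side
    rw [PySem.Str.toList_join, ← hlet]
    simp only [String.toList_ofList]
    have hBmap : List.map (String.toList ∘ fun p => String.ofList (List.replicate p.length '*'))
        (PySem.Chars.splitOn word.toList [c])
        = (pySplitC c word.toList []).map (fun p => List.replicate p.length '*') := by
      rw [splitOn_eq_pySplitC]
      simp [Function.comp]
    conv_rhs => rw [List.map_map]
    rw [hBmap, join_mask c word.toList []]
    simp only [List.length_nil, List.replicate_zero, List.nil_append]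
    -- A side: "".join over singleton strings
    have hnest : List.map String.toList
        (List.map (fun s => if (String.ofList [c] : String) ≠ s then "*" else s)
          (List.map (fun ch => String.ofList [ch]) word.toList))
        = List.map (fun ch => [ch]) (List.map (fun ch => if ch = c then ch else '*') word.toList) := by
      simp only [List.map_map]
      apply List.map_congr_left
      intro ch _
      by_cases hch : ch = c
      · simp [Function.comp, hch]
      · have hne : (String.ofList [c] : String) ≠ String.ofList [ch] := by
          simp only [ne_eq, String.ofList_inj, List.cons.injEq, and_true]
          exact fun hh => hch hh.symm
        simp only [Function.comp, if_pos hne, hch, if_false]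
        rfl
    rw [hnest]
    have h0 : ("" : String).toList = [] := rfl
    rw [h0]
    exact PySem.Chars.join_nil_singletons (word.toList.map (fun ch => if ch = c then ch else '*'))
  · simp only [hmem, if_false]
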